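-- pv_equiv track=rewrite | github.com/traagel/marching-cubes-generator | utils/cube_solver.py | map_pairs_to_letters
-- ===== SOURCE A (Python) =====
-- import string
--
-- def map_pairs_to_letters(polygon):
--     letters = list(string.ascii_uppercase)
--     index = 0
--     mapping = {}
--     for pair in polygon:
--         pair = list(pair)
--         for el in pair:
--             if el not in mapping:
--                 mapping[el] = letters[index]
--                 index += 1
--
--     return mapping
-- ===== SOURCE B (Python) =====
-- import string
--
-- def map_pairs_to_letters(polygon):
--     flat = [el for pair in polygon for el in pair]
--     order = sorted(set(flat), key=flat.index)
--     return {el: string.ascii_uppercase[i] for i, el in enumerate(order)}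
-- ===== Notes on version B (the rewrite author's own statement) =====
-- stated objective: alternative
-- what changed: Instead of A's single-pass accumulation with a membership check and a running index counter, B flattens the pairs, sorts the distinct elements by their first-occurrence index (sorted(set(flat), key=flat.index)) and assigns letters to that sorted order.
import Mathlib
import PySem

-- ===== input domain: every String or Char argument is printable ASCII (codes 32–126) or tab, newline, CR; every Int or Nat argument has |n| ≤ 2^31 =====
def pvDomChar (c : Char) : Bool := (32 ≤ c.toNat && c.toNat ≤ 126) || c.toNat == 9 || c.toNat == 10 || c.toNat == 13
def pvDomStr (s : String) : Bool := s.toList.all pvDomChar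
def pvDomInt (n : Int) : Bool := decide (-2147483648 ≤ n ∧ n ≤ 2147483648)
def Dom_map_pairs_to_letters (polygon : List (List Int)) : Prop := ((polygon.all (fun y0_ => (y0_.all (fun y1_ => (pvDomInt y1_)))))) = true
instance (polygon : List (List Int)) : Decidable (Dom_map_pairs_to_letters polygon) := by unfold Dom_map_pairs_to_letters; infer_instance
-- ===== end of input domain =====

-- B sorts the distinct elements by first-occurrence index (sorted(set(flat), key=flat.index))
-- instead of A's single-pass membership-check + running-counter accumulation; objective:
-- an alternative algorithm of similar cost.


-- list(string.ascii_uppercase): 26 one-character strings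
def pvLetters : List String :=
  ["A","B","C","D","E","F","G","H","I","J","K","L","M",
   "N","O","P","Q","R","S","T","U","V","W","X","Y","Z"]

-- letters[i]; Pre_ keeps the index < 26, so the "" default is never reached there
def pvLetterAt (i : Int) : String := (PySem.List.pyGet? pvLetters i).getD ""

-- ===== PORT A =====
def map_pairs_to_letters (polygon : List (List Int)) : List (Int × String) :=
  let st :=
    polygon.foldl (fun st pair =>
      pair.foldl (fun st el =>
        if st.2.contains el then st
        else (st.1 + 1, st.2.insert el (pvLetterAt st.1))) st)
      ((0 : Int), (PySem.Dict.empty : PySem.Dict Int String))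
  st.2.items

-- ===== PORT B =====
-- flat.index el never raises here (el always ∈ flat), so the .getD 0 default is unreachable;
-- the key is injective on the set, so sorting the set by it is order-exact.
def map_pairs_to_letters_alt (polygon : List (List Int)) : List (Int × String) :=
  let flat := polygon.flatMap (fun pair => pair)
  let order := PySem.List.sorted (PySem.Set.ofList flat)
                 (fun el => ((PySem.List.index? flat el).getD 0 : Nat)) false
  (PySem.List.enumerate order).map (fun p => (p.2, pvLetterAt p.1))

-- ===== PRECONDITION & SPEC =====
-- Pre_ excludes inputs with more than 26 distinct elements, on which the Python A
-- (and the Python B) raises IndexError indexing ascii_uppercase.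
def Pre_map_pairs_to_letters (polygon : List (List Int)) : Prop :=
  (PySem.List.dedup (polygon.flatMap (fun pair => pair))).length ≤ 26
instance (polygon : List (List Int)) : Decidable (Pre_map_pairs_to_letters polygon) := by
  unfold Pre_map_pairs_to_letters; infer_instance

def pvWitness_map_pairs_to_letters : List (List Int) := [[1, 2], [2, 3], []]

def Spec_map_pairs_to_letters (polygon : List (List Int)) (out : List (Int × String)) : Prop := out = map_pairs_to_letters_alt polygon
instance (polygon : List (List Int)) (out : List (Int × String)) : Decidable (Spec_map_pairs_to_letters polygon out) := by unfold Spec_map_pairs_to_letters; infer_instance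

-- ===== CLAIM (what is proved, stated in full; the proofs are below) =====
def Claim_equal_map_pairs_to_letters : Prop := ∀ (polygon : List (List Int)), Dom_map_pairs_to_letters polygon → Pre_map_pairs_to_letters polygon → Spec_map_pairs_to_letters polygon (map_pairs_to_letters polygon)

-- ===== LEMMAS AND PROOFS =====

-- the loop state of A after having seen exactly the distinct elements u (in order)
def pvState (u : List Int) : Int × PySem.Dict Int String :=
  ((u.length : Int),
   PySem.Dict.mk ((PySem.List.enumerate u).map (fun p => (p.2, pvLetterAt p.1))))

def pvStep (st : Int × PySem.Dict Int String) (el : Int) : Int × PySem.Dict Int String :=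
  if st.2.contains el then st else (st.1 + 1, st.2.insert el (pvLetterAt st.1))

lemma pvState_keys (u : List Int) : (pvState u).2.keys = u := by
  simp [pvState, PySem.Dict.keys, Function.comp_def, PySem.List.map_snd_enumerate]

lemma pvStep_state (u : List Int) (el : Int) :
    pvStep (pvState u) el = pvState (PySem.Set.add u el) := by
  have hk : (pvState u).2.contains el = decide (el ∈ u) := by
    rw [PySem.Dict.contains_eq_decide_mem_keys, pvState_keys]
  by_cases h : el ∈ u
  · simp [pvStep, hk, PySem.Set.add, PySem.Set.contains, h]
  · have hc : (pvState u).2.contains el = false := by simp [hk, h]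
    have hadd : PySem.Set.add u el = u ++ [el] := by
      simp [PySem.Set.add, PySem.Set.contains, h]
    rw [hadd]
    simp only [pvStep, hc, Bool.false_eq_true, if_false]
    apply Prod.ext
    · simp [pvState]
    · apply PySem.Dict.ext
      show ((pvState u).2.insert el (pvLetterAt (pvState u).1)).items = _
      rw [PySem.Dict.items_insert_of_not_contains _ _ hc]
      simp [pvState, PySem.List.enumerate_append, PySem.List.enumerate_cons,
            PySem.List.enumerate_nil]

lemma pvFold_state (l u : List Int) :
    l.foldl pvStep (pvState u) = pvState (PySem.Set.update u l) := by
  induction l generalizing u with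
  | nil => simp [PySem.Set.update]
  | cons x t ih =>
      rw [List.foldl_cons, pvStep_state u x, ih (PySem.Set.add u x)]
      simp [PySem.Set.update]

-- first-occurrence index of a member is in range
lemma pvKey_lt_length (l : List Int) (a : Int) (h : a ∈ l) :
    ((PySem.List.index? l a).getD 0 : Nat) < l.length := by
  obtain ⟨k, hk⟩ := Option.isSome_iff_exists.1
    ((PySem.List.index?_isSome_iff (xs := l) (v := a)).2 h)
  obtain ⟨hlt, -, -⟩ := PySem.List.getElem_of_index?_eq_some hk
  rw [hk]; simpa using hlt

-- ordered dedup of one more element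
lemma pvDedup_append (l : List Int) (v : Int) :
    PySem.List.dedup (l ++ [v])
      = if v ∈ l then PySem.List.dedup l else PySem.List.dedup l ++ [v] := by
  simp only [PySem.List.dedup_eq_ofList, PySem.Set.ofList_eq_foldl, List.foldl_append,
    List.foldl_cons, List.foldl_nil, PySem.Set.add, PySem.Set.contains]
  simp [← PySem.Set.ofList_eq_foldl, PySem.Set.mem_ofList]

-- first-occurrence indices strictly increase along the ordered dedup of xs
lemma pvDedup_pairwise (xs : List Int) :
    (PySem.List.dedup xs).Pairwise
      (fun a b => ((PySem.List.index? xs a).getD 0 : Nat) < (PySem.List.index? xs b).getD 0) := by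
  induction xs using List.reverseRecOn with
  | nil => simp [PySem.List.dedup, PySem.Set.ofList]
  | append_singleton l v ih =>
      rw [pvDedup_append]
      have hsub : ∀ a ∈ PySem.List.dedup l, a ∈ l := fun a ha => (PySem.List.mem_dedup l a).1 ha
      have hkeep : ∀ a ∈ l, PySem.List.index? (l ++ [v]) a = PySem.List.index? l a :=
        fun a ha => PySem.List.index?_append_of_mem [v] ha
      by_cases hv : v ∈ l
      · simp only [hv, if_true]
        exact List.Pairwise.imp_of_mem
          (fun ha hb hr => by rw [hkeep _ (hsub _ ha), hkeep _ (hsub _ hb)]; exact hr) ih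
      · simp only [hv, if_false]
        rw [List.pairwise_append]
        refine ⟨List.Pairwise.imp_of_mem
            (fun ha hb hr => by rw [hkeep _ (hsub _ ha), hkeep _ (hsub _ hb)]; exact hr) ih,
          List.pairwise_singleton _ _, ?_⟩
        intro a ha b hb
        rw [List.mem_singleton] at hb; subst hb
        rw [hkeep _ (hsub _ ha), PySem.List.index?_append_singleton_self l b hv]
        simpa using pvKey_lt_length l a (hsub _ ha)

-- B's sorted set is exactly the ordered dedup
lemma pvSorted_eq_dedup (xs : List Int) :
    PySem.List.sorted (PySem.Set.ofList xs)
      (fun el => ((PySem.List.index? xs el).getD 0 : Nat)) false = PySem.List.dedup xs := by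
  apply PySem.List.sorted_eq_of_perm_of_pairwise_lt
  · simp [PySem.List.dedup_eq_ofList]
  · exact pvDedup_pairwise xs

-- B unfolded, with the sorted set replaced by the ordered dedup
lemma pvAlt_eq (polygon : List (List Int)) :
    map_pairs_to_letters_alt polygon
      = (PySem.List.enumerate (PySem.List.dedup (polygon.flatMap (fun pair => pair)))).map
          (fun p => (p.2, pvLetterAt p.1)) := by
  show (PySem.List.enumerate (PySem.List.sorted _ _ false)).map _ = _
  rw [pvSorted_eq_dedup]

-- ===== VERDICT (by name: the statement is the Claim_ definition above) =====
theorem map_pairs_to_letters_spec : Claim_equal_map_pairs_to_letters := by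
  intro polygon _ _
  unfold Spec_map_pairs_to_letters map_pairs_to_letters
  rw [pvAlt_eq]
  have h0 : pvState [] = ((0 : Int), (PySem.Dict.empty : PySem.Dict Int String)) := rfl
  have h1 : polygon.foldl (fun (st : Int × PySem.Dict Int String) (pair : List Int) => pair.foldl pvStep st)
      ((0 : Int), (PySem.Dict.empty : PySem.Dict Int String))
      = (polygon.flatMap (fun pair => pair)).foldl pvStep (pvState []) := by
    rw [h0, List.foldl_flatMap]
  show ((polygon.foldl (fun (st : Int × PySem.Dict Int String) (pair : List Int) => pair.foldl pvStep st) _ ).2).items = _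
  rw [h1, pvFold_state _ []]
  simp [pvState, PySem.List.dedup_eq_ofList, PySem.Set.ofList, PySem.Set.update]
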